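-- pv_equiv track=rewrite | github.com/Barnista/The-Mon-Language-Dictionary-Database | app-py/alphabets/lib_alphabet.py | generate_cartesian_products
-- ===== SOURCE A (Python) =====
-- def generate_cartesian_products(arrays):
--     result = []
--
--     def helper(current, depth):
--         if depth == len(arrays):
--             result.append(current)
--             return
--
--         for char in arrays[depth]:
--             #new_current = current + ('-' if current else '') + char
--             new_current = current + ("" if current else '') + char
--             helper(new_current, depth + 1)
--
--     helper('', 0)
--     return result
-- ===== SOURCE B (Python) =====
-- def generate_cartesian_products(arrays):
--     result = ['']
--     for array in arrays:
--         result = [prefix + char for prefix in result for char in array]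
--     return result
-- ===== Notes on version B (the rewrite author's own statement) =====
-- stated objective: idiomatic
-- what changed: Replaced the depth-first recursion with a mutated shared result list by an iterative level-by-level expansion: start from [''] and combine each array into the running list of prefixes with a comprehension.
import Mathlib
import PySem

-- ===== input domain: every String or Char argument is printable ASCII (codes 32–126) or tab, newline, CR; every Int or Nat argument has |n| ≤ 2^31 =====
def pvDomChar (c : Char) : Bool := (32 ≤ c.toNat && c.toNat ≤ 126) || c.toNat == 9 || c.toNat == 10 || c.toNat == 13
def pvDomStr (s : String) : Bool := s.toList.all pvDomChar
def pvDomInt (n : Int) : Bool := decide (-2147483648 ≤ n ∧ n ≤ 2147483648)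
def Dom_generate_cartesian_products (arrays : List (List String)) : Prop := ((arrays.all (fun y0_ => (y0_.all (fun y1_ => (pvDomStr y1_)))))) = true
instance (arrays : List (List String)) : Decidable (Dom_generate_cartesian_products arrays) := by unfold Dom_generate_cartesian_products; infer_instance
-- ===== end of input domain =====

-- B is the same cartesian product written as an iterative level-by-level expansion (idiomatic); A's in-Python mutation of the shared `result` list is internal only.

-- ===== PORT A =====
-- helper(current, depth): recursion on the suffix arrays[depth:]; appends to the shared
-- `result` list, rendered here as returning the list of strings it appends, in order.
-- `current + ("" if current else '') + char` is `current ++ "" ++ char` in both branches.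
def pvHelperA (current : String) : List (List String) → List String
  | [] => [current]
  | arr :: rest =>
      arr.foldl (fun acc ch => acc ++ pvHelperA (current ++ "" ++ ch) rest) []

def generate_cartesian_products (arrays : List (List String)) : List String :=
  pvHelperA "" arrays

-- ===== PORT B =====
def generate_cartesian_products_alt (arrays : List (List String)) : List String :=
  arrays.foldl (fun result array => result.flatMap (fun pfx => array.map (fun ch => pfx ++ ch))) [""]

-- ===== PRECONDITION & SPEC =====
def Spec_generate_cartesian_products (arrays : List (List String)) (out : List String) : Prop := out = generate_cartesian_products_alt arrays
instance (arrays : List (List String)) (out : List String) : Decidable (Spec_generate_cartesian_products arrays out) := by unfold Spec_generate_cartesian_products; infer_instance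

-- ===== CLAIM (what is proved, stated in full; the proofs are below) =====
def Claim_equal_generate_cartesian_products : Prop := ∀ (arrays : List (List String)), Dom_generate_cartesian_products arrays → Spec_generate_cartesian_products arrays (generate_cartesian_products arrays)

-- ===== LEMMAS AND PROOFS =====

-- B's fold distributes over the starting list: each seed expands independently.
theorem pv_fold_flatMap (rest : List (List String)) (xs : List String) :
    rest.foldl (fun result array => result.flatMap (fun pfx => array.map (fun ch => pfx ++ ch))) xs
      = xs.flatMap (fun x => rest.foldl (fun result array => result.flatMap (fun pfx => array.map (fun ch => pfx ++ ch))) [x]) := by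
  induction rest generalizing xs with
  | nil => simp
  | cons arr rest ih =>
      simp only [List.foldl_cons]
      rw [ih, List.flatMap_assoc]
      refine congrFun (congrArg _ (funext fun x => ?_)) xs
      simp only [List.flatMap_cons, List.flatMap_nil, List.append_nil]
      rw [ih]

-- A's helper equals B's fold seeded with the current pfx.
theorem pv_helper_eq (rest : List (List String)) (current : String) :
    pvHelperA current rest
      = rest.foldl (fun result array => result.flatMap (fun pfx => array.map (fun ch => pfx ++ ch))) [current] := by
  induction rest generalizing current with
  | nil => simp [pvHelperA]
  | cons arr rest ih =>
      rw [pvHelperA, PySem.List.foldl_append_eq_flatMap]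
      simp only [List.nil_append, List.foldl_cons]
      rw [pv_fold_flatMap rest]
      simp [ih, List.flatMap_map]

-- ===== VERDICT (by name: the statement is the Claim_ definition above) =====
theorem generate_cartesian_products_spec : Claim_equal_generate_cartesian_products := by
  intro arrays _
  unfold Spec_generate_cartesian_products generate_cartesian_products generate_cartesian_products_alt
  exact pv_helper_eq arrays ""
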